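-- pv_equiv track=rewrite | github.com/richardpanda/advent-of-code-2018 | day05/polymer.py | count_units
-- ===== SOURCE A (Python) =====
-- def count_units(polymer):
--     stack, is_destroyed = [], [False] * len(polymer)
--     for i in range(len(polymer)):
--         if stack and is_reactive(polymer[i], polymer[stack[-1]]):
--             is_destroyed[i] = is_destroyed[stack.pop()] = True
--         else:
--             stack.append(i)
--     return len(polymer) - sum(is_destroyed)
--
-- def is_reactive(c1, c2):
--     return (
--         (c1.islower() and c2.isupper()) or (c1.isupper() and c2.islower())
--     ) and c1.lower() == c2.lower()
-- ===== SOURCE B (Python) =====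
-- def count_units(polymer):
--     units = list(polymer)
--     while True:
--         out = []
--         i = 0
--         while i < len(units):
--             if i + 1 < len(units) and is_reactive(units[i], units[i + 1]):
--                 i += 2  # drop the reacting pair
--             else:
--                 out.append(units[i])
--                 i += 1
--         if len(out) == len(units):
--             return len(units)
--         units = out
--
-- def is_reactive(c1, c2):
--     return (
--         (c1.islower() and c2.isupper()) or (c1.isupper() and c2.islower())
--     ) and c1.lower() == c2.lower()
-- ===== Notes on version B (the rewrite author's own statement) =====
-- stated objective: alternative
-- what changed: Replaced A's single stack-of-indices pass with an is_destroyed table by repeated full copy-passes that drop adjacent reactive pairs until a fixpoint (confluence of the pairwise cancellation makes the remaining length identical).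
import Mathlib
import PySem

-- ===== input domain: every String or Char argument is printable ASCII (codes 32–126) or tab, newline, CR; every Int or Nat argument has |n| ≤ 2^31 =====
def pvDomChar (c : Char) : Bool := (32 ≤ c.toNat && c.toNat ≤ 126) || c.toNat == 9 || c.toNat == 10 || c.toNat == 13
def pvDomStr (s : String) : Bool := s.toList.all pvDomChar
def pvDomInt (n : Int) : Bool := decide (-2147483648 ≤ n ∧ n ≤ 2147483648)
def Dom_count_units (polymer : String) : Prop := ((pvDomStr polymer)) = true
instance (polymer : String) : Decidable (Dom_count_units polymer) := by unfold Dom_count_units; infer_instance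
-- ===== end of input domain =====

-- B replaces A's single index-stack pass (with an is_destroyed table) by repeated
-- full copy-passes that drop adjacent reactive pairs until a fixpoint: an
-- alternative decomposition of the same exact reduction (not claimed faster).

-- ===== PORT A =====
-- is_reactive, shared verbatim by Source A and Source B
def isReactive (c1 c2 : Char) : Bool :=
  ((PySem.Chars.islower c1 && PySem.Chars.isupper c2) ||
   (PySem.Chars.isupper c1 && PySem.Chars.islower c2)) &&
  (PySem.Chars.lowerChar c1 == PySem.Chars.lowerChar c2)

-- A's loop body; the Python list used as a stack (append/pop/[-1] at the end) is
-- ported as a Lean list with its top at the head.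
def stepA (cs : List Char) (st : List Nat × List Bool) (i : Nat) : List Nat × List Bool :=
  match st with
  | (stack, des) =>
    match stack with
    | j :: rest =>
      if isReactive (cs.getD i ' ') (cs.getD j ' ') then
        (rest, (des.set j true).set i true)
      else (i :: j :: rest, des)
    | [] => (i :: stack, des)

def count_units (polymer : String) : Int :=
  let cs := polymer.toList
  let n := cs.length
  let res := (List.range n).foldl (stepA cs) ([], List.replicate n false)
  (n : Int) - (res.2.count true : Int)

-- ===== PORT B =====
-- one left-to-right pass: drop each adjacent reactive pair, keep everything else
def passB : List Char → List Char
  | a :: b :: rest => if isReactive a b then passB rest else a :: passB (b :: rest)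
  | l => l

theorem passB_length_le (l : List Char) : (passB l).length ≤ l.length := by
  fun_induction passB <;> simp_all
  omega

-- repeat passes until a pass removes nothing, then return the length
def loopB (units : List Char) : Int :=
  if (passB units).length = units.length then (units.length : Int)
  else loopB (passB units)
termination_by units.length
decreasing_by
  have := passB_length_le units
  omega

def count_units_alt (polymer : String) : Int := loopB polymer.toList

-- ===== PRECONDITION & SPEC =====
def Spec_count_units (polymer : String) (out : Int) : Prop := out = count_units_alt polymer
instance (polymer : String) (out : Int) : Decidable (Spec_count_units polymer out) := by unfold Spec_count_units; infer_instance

-- ===== CLAIM (what is proved, stated in full; the proofs are below) =====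
def Claim_equal_count_units : Prop := ∀ (polymer : String), Dom_count_units polymer → Spec_count_units polymer (count_units polymer)

-- ===== LEMMAS AND PROOFS =====

-- ---- character-level facts about is_reactive ----
theorem islower_iff (c : Char) : PySem.Chars.islower c = true ↔ 97 ≤ c.toNat ∧ c.toNat ≤ 122 := by
  unfold PySem.Chars.islower
  simp [Char.le_def, UInt32.le_iff_toNat_le, Char.toNat_val]

theorem isupper_iff (c : Char) : PySem.Chars.isupper c = true ↔ 65 ≤ c.toNat ∧ c.toNat ≤ 90 := by
  unfold PySem.Chars.isupper
  simp [Char.le_def, UInt32.le_iff_toNat_le, Char.toNat_val]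

theorem charToNat_inj (a b : Char) (h : a.toNat = b.toNat) : a = b :=
  Char.ext (UInt32.toNat_inj.mp h)

theorem toNat_ofNat_small (n : Nat) (h : n < 1000) : (Char.ofNat n).toNat = n := by
  unfold Char.ofNat
  rw [dif_pos]
  · rfl
  · constructor; omega

theorem lower_not_upper (c : Char) (h : PySem.Chars.islower c = true) :
    PySem.Chars.isupper c = false := by
  rw [← Bool.not_eq_true]
  intro hu
  rw [islower_iff] at h; rw [isupper_iff] at hu
  omega

theorem lowerChar_of_upper (c : Char) (h : PySem.Chars.isupper c = true) :
    PySem.Chars.lowerChar c = Char.ofNat (c.toNat + 32) := by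
  simp [PySem.Chars.lowerChar, h]

theorem lowerChar_of_lower (c : Char) (h : PySem.Chars.islower c = true) :
    PySem.Chars.lowerChar c = c := by
  simp [PySem.Chars.lowerChar, lower_not_upper c h]

theorem isReactive_comm (a b : Char) : isReactive a b = isReactive b a := by
  simp only [isReactive]
  rw [Bool.or_comm]
  congr 1
  · congr 1 <;> rw [Bool.and_comm]
  · exact Bool.beq_comm ..

-- a character has at most one reaction partner
theorem isReactive_uniq (a b c : Char) (h1 : isReactive a b = true)
    (h2 : isReactive a c = true) : b = c := by
  simp only [isReactive, Bool.and_eq_true, Bool.or_eq_true, beq_iff_eq] at h1 h2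
  obtain ⟨hc1, hl1⟩ := h1
  obtain ⟨hc2, hl2⟩ := h2
  have hbc : PySem.Chars.lowerChar b = PySem.Chars.lowerChar c := by rw [← hl1, hl2]
  rcases hc1 with ⟨ha, hb⟩ | ⟨ha, hb⟩ <;> rcases hc2 with ⟨ha', hc⟩ | ⟨ha', hc⟩
  · -- b, c both upper
    rw [lowerChar_of_upper b hb, lowerChar_of_upper c hc] at hbc
    have hb' := (isupper_iff b).mp hb
    have hc' := (isupper_iff c).mp hc
    have := congrArg Char.toNat hbc
    rw [toNat_ofNat_small _ (by omega), toNat_ofNat_small _ (by omega)] at this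
    exact charToNat_inj _ _ (by omega)
  · exfalso; rw [islower_iff] at ha; rw [isupper_iff] at ha'; omega
  · exfalso; rw [isupper_iff] at ha; rw [islower_iff] at ha'; omega
  · -- b, c both lower
    rw [lowerChar_of_lower b hb, lowerChar_of_lower c hc] at hbc
    exact hbc

-- ---- the abstract character stack ----
def stepC (st : List Char) (c : Char) : List Char :=
  match st with
  | [] => [c]
  | t :: r => if isReactive c t then r else c :: t :: r

def NR (a b : Char) : Prop := isReactive a b = false

theorem NR_symm {a b : Char} (h : NR a b) : NR b a := by
  simp only [NR] at h ⊢
  rw [isReactive_comm]; exact h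

theorem stepC_chain {st : List Char} (h : List.IsChain NR st) (c : Char) :
    List.IsChain NR (stepC st c) := by
  match st with
  | [] => simp [stepC]
  | t :: r =>
    simp only [stepC]
    split
    · exact h.tail
    · next h' => exact List.isChain_cons_cons.mpr ⟨by simp [NR, h'], h⟩

-- removing one adjacent reactive pair does not change the fold from an irreducible stack
theorem fold_drop_pair (a b : Char) (l : List Char) (hab : isReactive a b = true)
    (st : List Char) (hst : List.IsChain NR st) :
    List.foldl stepC st (a :: b :: l) = List.foldl stepC st l := by
  match st with
  | [] =>
    simp [List.foldl, stepC, isReactive_comm b a, hab]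
  | c :: st' =>
    simp only [List.foldl, stepC]
    by_cases hac : isReactive a c = true
    · rw [if_pos hac]
      have hbc : b = c := isReactive_uniq a b c hab hac
      subst hbc
      match st' with
      | [] => simp
      | d :: st'' =>
        have hbd : NR b d := (List.isChain_cons_cons.mp hst).1
        simp only [NR] at hbd
        simp [hbd]
    · rw [if_neg hac]
      simp [isReactive_comm b a, hab]

-- a full pass of B does not change the fold result
theorem fold_passB (cs : List Char) : ∀ st : List Char, List.IsChain NR st →
    List.foldl stepC st (passB cs) = List.foldl stepC st cs := by
  fun_induction passB with
  | case1 a b rest hab ih =>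
    intro st hst
    rw [ih st hst, fold_drop_pair a b rest hab st hst]
  | case2 a b rest hab ih =>
    intro st hst
    simp only [List.foldl]
    exact ih (stepC st a) (stepC_chain hst a)
  | case3 l h =>
    intro st _; rfl

-- a pass that removes nothing is the identity and leaves an irreducible string
theorem passB_of_len_eq (cs : List Char) (h : (passB cs).length = cs.length) :
    passB cs = cs := by
  fun_induction passB with
  | case1 a b rest hab ih =>
    exfalso
    have := passB_length_le rest
    simp at h; omega
  | case2 a b rest hab ih =>
    simp only [List.length_cons, Nat.succ_inj] at h ⊢
    rw [ih h]
  | case3 l hl => rfl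

theorem chain_of_passB_fix (cs : List Char) (h : passB cs = cs) : List.IsChain NR cs := by
  fun_induction passB with
  | case1 a b rest hab ih =>
    exfalso
    have := passB_length_le rest
    have := congrArg List.length h
    simp at this; omega
  | case2 a b rest hab ih =>
    simp only [List.cons.injEq, true_and] at h
    exact List.isChain_cons_cons.mpr ⟨by simpa [NR] using hab, ih h⟩
  | case3 l hl =>
    rcases l with _ | ⟨a, _ | ⟨b, r⟩⟩
    · simp
    · simp
    · exact (hl a b r rfl).elim

-- folding an irreducible string just pushes everything
theorem fold_of_chain (cs : List Char) (h : List.IsChain NR cs) :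
    ∀ st : List Char,
      (∀ c t, cs.head? = some c → st.head? = some t → NR c t) →
      List.foldl stepC st cs = cs.reverse ++ st := by
  induction cs with
  | nil => intro st _; simp
  | cons c cs' ih =>
    intro st hhd
    have hpush : stepC st c = c :: st := by
      match st with
      | [] => rfl
      | t :: r =>
        have : NR c t := hhd c t rfl rfl
        simp only [NR] at this
        simp [stepC, this]
    simp only [List.foldl, hpush]
    rw [ih ((List.isChain_cons.mp h).2) (c :: st) ?_]
    · simp
    · intro d t hd ht
      simp only [List.head?_cons, Option.some.injEq] at ht
      subst ht
      exact NR_symm ((List.isChain_cons.mp h).1 d (by simp [hd]))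

theorem SR_length_of_chain (cs : List Char) (h : List.IsChain NR cs) :
    (List.foldl stepC [] cs).length = cs.length := by
  rw [fold_of_chain cs h [] (by intro c t _ ht; simp at ht)]
  simp

-- B computes the length of the stack fold
theorem loopB_eq (cs : List Char) : loopB cs = ((List.foldl stepC [] cs).length : Int) := by
  fun_induction loopB with
  | case1 units hl =>
    have hfix := passB_of_len_eq units hl
    have hch := chain_of_passB_fix units hfix
    rw [SR_length_of_chain units hch]
  | case2 units hl ih =>
    rw [ih, fold_passB units [] (by simp)]

-- ---- A's fold tracks the character stack ----
def InvA (cs : List Char) (k : Nat) (p : List Nat × List Bool) : Prop :=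
  p.2.length = cs.length ∧
  p.1.map (fun j => cs.getD j ' ') = List.foldl stepC [] (cs.take k) ∧
  (∀ j ∈ p.1, j < k) ∧
  List.Pairwise (fun a b => b < a) p.1 ∧
  (∀ m, m < cs.length → (k ≤ m ∨ m ∈ p.1) → p.2.getD m true = false) ∧
  p.2.count true = k - p.1.length ∧
  p.1.length ≤ k

theorem invA_step (cs : List Char) (k : Nat) (hk : k < cs.length)
    (p : List Nat × List Bool) (h : InvA cs k p) :
    InvA cs (k + 1) (stepA cs p k) := by
  obtain ⟨hlen, hmap, hlt, hpw, hdes, hcnt, hsl⟩ := h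
  have htake : cs.take (k + 1) = cs.take k ++ [cs.getD k ' '] := by
    rw [List.take_add_one]
    simp [List.getD, List.getElem?_eq_getElem hk]
  obtain ⟨stack, des⟩ := p
  match stack with
  | [] =>
    simp only [stepA]
    refine ⟨hlen, ?_, ?_, ?_, ?_, ?_, ?_⟩
    · simp only at hmap
      rw [htake, List.foldl_append, ← hmap]
      simp [stepC]
    · intro j hj; simp at hj; omega
    · simp
    · intro m hm hcond
      apply hdes m hm
      simp at hcond
      left; omega
    · simpa using hcnt
    · simp
  | j :: rest =>
    have hj : j < k := hlt j (by simp)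
    simp only [stepA]
    by_cases hr : isReactive (cs.getD k ' ') (cs.getD j ' ') = true
    · rw [if_pos hr]
      have hjltn : j < cs.length := by omega
      have hdesj : des.getD j true = false := hdes j hjltn (Or.inr (by simp))
      have hdesk : des.getD k true = false := hdes k hk (Or.inl le_rfl)
      have hkj : k ≠ j := by omega
      have hlen' : des.length = cs.length := by simpa using hlen
      refine ⟨by simp [hlen'], ?_, ?_, ?_, ?_, ?_, ?_⟩
      · simp only [List.map] at hmap
        rw [htake, List.foldl_append, ← hmap]
        simp only [List.foldl, stepC]
        rw [if_pos hr]
      · intro j' hj'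
        have := hlt j' (by simp [hj'])
        omega
      · exact hpw.tail
      · -- all indices in rest are < j
        have hrestlt : ∀ m ∈ rest, m < j := by
          intro m hm
          exact (List.pairwise_cons.mp hpw).1 m hm
        intro m hm hcond
        have hmj : m ≠ j := by
          rcases hcond with h1 | h1
          · omega
          · have := hrestlt m h1; omega
        have hmk : m ≠ k := by
          rcases hcond with h1 | h1
          · omega
          · have := hlt m (by simp [h1]); omega
        have hold : des.getD m true = false := by
          apply hdes m hm
          rcases hcond with h1 | h1
          · left; omega
          · right; simp [h1]
        simp only [List.getD, List.getElem?_set_ne (Ne.symm hmk),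
          List.getElem?_set_ne (Ne.symm hmj)] at *
        exact hold
      · -- count goes up by two
        have hjl : j < des.length := by omega
        have hkl : k < des.length := by omega
        have hdj : des[j]'hjl = false := by
          simpa [List.getD, List.getElem?_eq_getElem hjl] using hdesj
        have hdk : (des.set j true)[k]'(by simpa using hkl) = false := by
          rw [List.getElem_set_ne (by omega)]
          simpa [List.getD, List.getElem?_eq_getElem hkl] using hdesk
        show ((des.set j true).set k true).count true = (k + 1) - rest.length
        rw [List.count_set (by simpa using hkl), List.count_set hjl]
        have h1 : des.count true = k - (j :: rest).length := hcnt
        have h2 : (j :: rest).length ≤ k := hsl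
        simp only [List.length_cons] at h1 h2
        simp [hdj, hdk, h1]
        omega
      · show rest.length ≤ k + 1
        have h2 : (j :: rest).length ≤ k := hsl
        simp only [List.length_cons] at h2
        omega
    · rw [if_neg hr]
      refine ⟨hlen, ?_, ?_, ?_, ?_, ?_, ?_⟩
      · simp only [List.map] at hmap
        rw [htake, List.foldl_append, ← hmap]
        simp only [List.foldl, List.map, stepC]
        rw [if_neg hr]
      · intro j' hj'
        simp at hj'
        rcases hj' with he | he | he
        · omega
        · omega
        · have := hlt j' (by simp [he]); omega
      · refine List.pairwise_cons.mpr ⟨?_, hpw⟩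
        intro m hm
        have := hlt m (by simp [hm]); omega
      · intro m hm hcond
        apply hdes m hm
        simp at hcond
        rcases hcond with h1 | h1 | h1 | h1
        · left; omega
        · left; omega
        · right; simp [h1]
        · right; simp [h1]
      · show des.count true = (k + 1) - (k :: j :: rest).length
        have h1 : des.count true = k - (j :: rest).length := hcnt
        simp only [List.length_cons] at h1 ⊢
        omega
      · show (k :: j :: rest).length ≤ k + 1
        have h2 : (j :: rest).length ≤ k := hsl
        simp only [List.length_cons] at h2 ⊢
        omega

theorem invA_all (cs : List Char) (k : Nat) (hk : k ≤ cs.length) :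
    InvA cs k ((List.range k).foldl (stepA cs) ([], List.replicate cs.length false)) := by
  induction k with
  | zero =>
    refine ⟨by simp, by simp, by simp, by simp, ?_, by simp [List.count_replicate], by simp⟩
    intro m hm _
    simp [List.getD, hm]
  | succ k ih =>
    rw [List.range_succ, List.foldl_append]
    exact invA_step cs k (by omega) _ (ih (by omega))

-- A computes the length of the stack fold
theorem count_units_eq (polymer : String) :
    count_units polymer = ((List.foldl stepC [] polymer.toList).length : Int) := by
  unfold count_units
  have h := invA_all polymer.toList polymer.toList.length le_rfl
  obtain ⟨hlen, hmap, hlt, hpw, hdes, hcnt, hsl⟩ := h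
  rw [List.take_length] at hmap
  have hstl := congrArg List.length hmap
  simp only [List.length_map] at hstl
  simp only [hcnt]
  omega

-- ===== VERDICT (by name: the statement is the Claim_ definition above) =====
theorem count_units_spec : Claim_equal_count_units := by
  intro polymer _
  unfold Spec_count_units count_units_alt
  rw [count_units_eq, loopB_eq]
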